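-- pv_equiv track=rewrite | github.com/alashtarmaria/Python | Egzersiz/dic/dic_soru_8.py | tekleri_sil
-- ===== SOURCE A (Python) =====
-- def tekleri_sil(sozluk):
--
--     d = {}
--
--     for index, item in enumerate(sozluk.items()):
--
--         key = item[0]
--         value = item[1]
--
--         if index % 2 == 0:
--             d[key] = value
--
--     return d
-- ===== SOURCE B (Python) =====
-- def tekleri_sil(sozluk):
--     return dict(list(sozluk.items())[::2])
-- ===== Notes on version B (the rewrite author's own statement) =====
-- stated objective: idiomatic
-- what changed: Replaces the explicit enumerate loop with its modulo test and per-item dict insertion by materialising the item list once and taking every other element with stride slicing, then wrapping it back into a dict.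
import Mathlib
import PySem

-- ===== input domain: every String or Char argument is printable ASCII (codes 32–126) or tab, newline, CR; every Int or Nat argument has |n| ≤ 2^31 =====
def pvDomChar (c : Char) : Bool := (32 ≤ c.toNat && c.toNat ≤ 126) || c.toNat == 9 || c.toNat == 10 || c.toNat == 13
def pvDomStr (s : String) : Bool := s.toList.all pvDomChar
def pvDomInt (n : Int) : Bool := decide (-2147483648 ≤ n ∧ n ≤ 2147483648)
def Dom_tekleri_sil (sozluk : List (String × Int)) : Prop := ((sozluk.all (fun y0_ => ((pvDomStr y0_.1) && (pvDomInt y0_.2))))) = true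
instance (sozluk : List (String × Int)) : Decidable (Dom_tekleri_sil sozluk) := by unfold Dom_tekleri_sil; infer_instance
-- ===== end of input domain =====

-- B is a more idiomatic re-implementation: it materialises the item list once, takes every
-- other element with a stride-2 slice, and wraps the result back into a dict.


-- ===== PORT A =====
-- for index, item in enumerate(sozluk.items()): if index % 2 == 0: d[key] = value
def tekleri_sil (sozluk : List (String × Int)) : List (String × Int) :=
  ((PySem.List.enumerate sozluk).foldl
    (fun d (p : Int × (String × Int)) =>
      if PySem.Int.mod p.1 2 == 0 then d.insert p.2.1 p.2.2 else d)
    PySem.Dict.empty).items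

-- ===== PORT B =====
-- hand port of the stride-2 slice list(...)[::2] (start 0, step 2, to the end): exact on lists
def pvEveryOther {α : Type} : List α → List α
  | [] => []
  | [x] => [x]
  | x :: _ :: rest => x :: pvEveryOther rest

def tekleri_sil_alt (sozluk : List (String × Int)) : List (String × Int) :=
  (PySem.Dict.ofList (pvEveryOther sozluk)).items

-- ===== PRECONDITION & SPEC =====
def Spec_tekleri_sil (sozluk : List (String × Int)) (out : List (String × Int)) : Prop := out = tekleri_sil_alt sozluk
instance (sozluk : List (String × Int)) (out : List (String × Int)) : Decidable (Spec_tekleri_sil sozluk out) := by unfold Spec_tekleri_sil; infer_instance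

-- ===== CLAIM (what is proved, stated in full; the proofs are below) =====
def Claim_equal_tekleri_sil : Prop := ∀ (sozluk : List (String × Int)), Dom_tekleri_sil sozluk → Spec_tekleri_sil sozluk (tekleri_sil sozluk)

-- ===== LEMMAS AND PROOFS =====

theorem pv_fmod_two (s : Int) : Int.fmod s 2 = s % 2 :=
  Int.fmod_eq_emod_of_nonneg s (by norm_num)

-- A's loop from an even start index performs exactly the inserts of the stride-2 sublist.
theorem pv_loop_eq (xs : List (String × Int)) :
    ∀ (s : Int) (d : PySem.Dict String Int), PySem.Int.mod s 2 = 0 →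
    (PySem.List.enumerate xs s).foldl
      (fun d (p : Int × (String × Int)) =>
        if PySem.Int.mod p.1 2 == 0 then d.insert p.2.1 p.2.2 else d) d
    = (pvEveryOther xs).foldl (fun d (p : String × Int) => d.insert p.1 p.2) d := by
  induction xs using pvEveryOther.induct with
  | case1 => intro s d h; simp [PySem.List.enumerate, pvEveryOther]
  | case2 x =>
      intro s d h
      unfold PySem.Int.mod at h
      rw [pv_fmod_two] at h
      have hx : (PySem.Int.mod s 2 == 0) = true := by
        unfold PySem.Int.mod; rw [beq_iff_eq, pv_fmod_two]; omega
      simp only [PySem.List.enumerate_cons, PySem.List.enumerate_nil, List.foldl, pvEveryOther]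
      rw [hx]
      simp
  | case3 x y rest ih =>
      intro s d h
      unfold PySem.Int.mod at h
      rw [pv_fmod_two] at h
      have hx : (PySem.Int.mod s 2 == 0) = true := by
        unfold PySem.Int.mod; rw [beq_iff_eq, pv_fmod_two]; omega
      have hy : (PySem.Int.mod (s + 1) 2 == 0) = false := by
        unfold PySem.Int.mod; rw [beq_eq_false_iff_ne, pv_fmod_two]; omega
      have h2 : PySem.Int.mod (s + 1 + 1) 2 = 0 := by
        unfold PySem.Int.mod; rw [pv_fmod_two]; omega
      rw [PySem.List.enumerate_cons, PySem.List.enumerate_cons]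
      simp only [List.foldl, pvEveryOther]
      rw [hx, hy]
      simp only [if_true, if_false, Bool.false_eq_true]
      exact ih (s + 1 + 1) _ h2

theorem pv_ofList_eq_foldl (l : List (String × Int)) :
    PySem.Dict.ofList l = l.foldl (fun d (p : String × Int) => d.insert p.1 p.2) PySem.Dict.empty := by
  rfl

-- ===== VERDICT (by name: the statement is the Claim_ definition above) =====
theorem tekleri_sil_spec : Claim_equal_tekleri_sil := by
  intro sozluk _
  unfold Spec_tekleri_sil tekleri_sil tekleri_sil_alt
  rw [pv_loop_eq sozluk 0 PySem.Dict.empty (by decide), pv_ofList_eq_foldl]
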